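-- pv_equiv track=rewrite | github.com/Falcoria/scanledger | app/projects/utils.py | merge_dicts_in_list
-- ===== SOURCE A (Python) =====
-- def merge_dicts_in_list(lst, key):
--     """ Merges the dictionaries in the list based on the key."""
--     merged_dict = {}
--     for d in lst:
--         if key in d:
--             current_key_value = d[key]
--             if current_key_value in merged_dict:
--                 merged_dict[current_key_value].update(d)
--             else:
--                 merged_dict[current_key_value] = dict(d)
--     return list(merged_dict.values())
-- ===== SOURCE B (Python) =====
-- def merge_dicts_in_list(lst, key):
--     """Merges the dictionaries in the list based on the key."""
--     keyed = [d for d in lst if key in d]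
--     order = []
--     for d in keyed:
--         if d[key] not in order:
--             order.append(d[key])
--     result = []
--     for v in order:
--         merged = {}
--         for d in keyed:
--             if d[key] == v:
--                 merged.update(d)
--         result.append(merged)
--     return result
-- ===== Notes on version B (the rewrite author's own statement) =====
-- stated objective: alternative
-- what changed: Drops A's single grouping dict entirely: B first collects the distinct key values in first-appearance order, then for each such value performs a full rescan of the list, merging the matching dicts into a fresh dict (nested scans, O(n*k), instead of A's one-pass hash-merge).
import Mathlib
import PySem

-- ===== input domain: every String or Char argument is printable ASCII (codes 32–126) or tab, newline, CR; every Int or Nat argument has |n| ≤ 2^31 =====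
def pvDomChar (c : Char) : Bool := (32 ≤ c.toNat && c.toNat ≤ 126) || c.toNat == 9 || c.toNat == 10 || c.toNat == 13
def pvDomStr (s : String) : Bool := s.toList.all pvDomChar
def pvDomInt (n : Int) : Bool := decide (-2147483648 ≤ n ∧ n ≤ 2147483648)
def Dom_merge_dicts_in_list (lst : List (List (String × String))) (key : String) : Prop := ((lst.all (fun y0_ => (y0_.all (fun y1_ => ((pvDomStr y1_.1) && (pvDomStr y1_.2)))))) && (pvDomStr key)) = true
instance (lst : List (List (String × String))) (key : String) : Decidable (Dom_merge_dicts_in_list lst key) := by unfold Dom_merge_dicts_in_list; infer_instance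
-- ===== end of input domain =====

-- B replaces A's one-pass hash-merge with nested scans: collect the distinct key values
-- in first-appearance order, then rescan the list once per value, merging the matches.

-- ===== PORT A =====
-- one scan: merged_dict[d[key]] is updated in place (or created as a copy of d)
def merge_dicts_in_list (lst : List (List (String × String))) (key : String) : List (List (String × String)) :=
  let merged := lst.foldl (fun (m : PySem.Dict String (PySem.Dict String String)) dl =>
    let d := PySem.Dict.ofList dl            -- the element is a Python dict
    if d.contains key then
      let v := d.getD key ""
      if m.contains v then
        m.insert v ((m.getD v PySem.Dict.empty).update d.items)   -- merged_dict[v].update(d)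
      else
        m.insert v d                                              -- merged_dict[v] = dict(d)
    else m) PySem.Dict.empty
  merged.values.map (fun d => d.items)

-- ===== PORT B =====
-- d[key] of a dict known to contain key
def pvKeyVal (key : String) (dl : List (String × String)) : String :=
  (PySem.Dict.ofList dl).getD key ""

def merge_dicts_in_list_alt (lst : List (List (String × String))) (key : String) : List (List (String × String)) :=
  let keyed := lst.filter (fun dl => (PySem.Dict.ofList dl).contains key)
  let order := keyed.foldl (fun (o : List String) dl =>
      if o.contains (pvKeyVal key dl) then o else o ++ [pvKeyVal key dl]) []
  order.map (fun v =>
    (keyed.foldl (fun (m : PySem.Dict String String) dl =>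
        if pvKeyVal key dl == v then m.update (PySem.Dict.ofList dl).items else m)
      PySem.Dict.empty).items)

-- ===== PRECONDITION & SPEC =====
def Spec_merge_dicts_in_list (lst : List (List (String × String))) (key : String) (out : List (List (String × String))) : Prop := out = merge_dicts_in_list_alt lst key
instance (lst : List (List (String × String))) (key : String) (out : List (List (String × String))) : Decidable (Spec_merge_dicts_in_list lst key out) := by unfold Spec_merge_dicts_in_list; infer_instance

-- ===== CLAIM (what is proved, stated in full; the proofs are below) =====
def Claim_equal_merge_dicts_in_list : Prop := ∀ (lst : List (List (String × String))) (key : String), Dom_merge_dicts_in_list lst key → Spec_merge_dicts_in_list lst key (merge_dicts_in_list lst key)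

-- ===== LEMMAS AND PROOFS =====

-- B's order accumulator and per-value merge, as named folds
def pvOrder (key : String) (o : List String) (K : List (List (String × String))) : List String :=
  K.foldl (fun o dl =>
    if o.contains (pvKeyVal key dl) then o else o ++ [pvKeyVal key dl]) o

def pvMergeFor (key : String) (v : String) (K : List (List (String × String))) : PySem.Dict String String :=
  K.foldl (fun m dl =>
    if pvKeyVal key dl == v then m.update (PySem.Dict.ofList dl).items else m) PySem.Dict.empty

theorem pvOfList_items (d : List (String × String)) :
    PySem.Dict.ofList (PySem.Dict.ofList d).items = PySem.Dict.ofList d := by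
  apply PySem.Dict.ext
  have h := PySem.Dict.items_foldl_insert_fresh (PySem.Dict.ofList d).items
      (fun p => p.1) (fun p => p.2) (PySem.Dict.empty (κ := String) (ν := String))
      (by intro a _; rfl) (PySem.Dict.nodup_keys_ofList d)
  simpa [PySem.Dict.ofList, PySem.Dict.update, PySem.Dict.empty] using h

theorem pvOrder_nodup (key : String) (K : List (List (String × String))) :
    ∀ o : List String, o.Nodup → (pvOrder key o K).Nodup := by
  induction K with
  | nil => intro o h; exact h
  | cons dl K ih =>
    intro o h
    show (pvOrder key (if o.contains (pvKeyVal key dl) then o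
        else o ++ [pvKeyVal key dl]) K).Nodup
    by_cases hc : o.contains (pvKeyVal key dl) = true
    · rw [if_pos hc]; exact ih o h
    · rw [if_neg hc]
      have hm : pvKeyVal key dl ∉ o := by simpa using hc
      refine ih _ ?_
      rw [List.nodup_append]
      refine ⟨h, List.nodup_singleton _, ?_⟩
      intro a ha b hb heq
      rw [List.mem_singleton] at hb
      exact hm ((heq.trans hb) ▸ ha)

theorem pvOrder_mono (key : String) (K : List (List (String × String))) :
    ∀ o : List String, ∀ v ∈ o, v ∈ pvOrder key o K := by
  induction K with
  | nil => intro o v hv; exact hv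
  | cons dl K ih =>
    intro o v hv
    show v ∈ pvOrder key (if o.contains (pvKeyVal key dl) then o
        else o ++ [pvKeyVal key dl]) K
    by_cases hc : o.contains (pvKeyVal key dl) = true
    · rw [if_pos hc]; exact ih o v hv
    · rw [if_neg hc]; exact ih _ v (List.mem_append_left _ hv)

theorem pvOrder_of_mem (key : String) (K : List (List (String × String))) :
    ∀ o : List String, ∀ dl ∈ K, pvKeyVal key dl ∈ pvOrder key o K := by
  induction K with
  | nil => intro o dl h; simp at h
  | cons dl' K ih =>
    intro o dl h
    rcases List.mem_cons.mp h with h | h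
    · subst h
      show pvKeyVal key dl ∈ pvOrder key (if o.contains (pvKeyVal key dl) then o
          else o ++ [pvKeyVal key dl]) K
      by_cases hc : o.contains (pvKeyVal key dl) = true
      · rw [if_pos hc]
        exact pvOrder_mono key K o _ (by simpa using hc)
      · rw [if_neg hc]
        exact pvOrder_mono key K _ _ (by simp)
    · show pvKeyVal key dl ∈ pvOrder key (if o.contains (pvKeyVal key dl') then o
          else o ++ [pvKeyVal key dl']) K
      by_cases hc : o.contains (pvKeyVal key dl') = true
      · rw [if_pos hc]; exact ih o dl h
      · rw [if_neg hc]; exact ih _ dl h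

theorem pvMergeFor_empty (key : String) (v : String) (K : List (List (String × String)))
    (h : ∀ dl ∈ K, pvKeyVal key dl ≠ v) : pvMergeFor key v K = PySem.Dict.empty := by
  induction K with
  | nil => rfl
  | cons dl K ih =>
    have hd : (pvKeyVal key dl == v) = false := by
      simpa using h dl (List.mem_cons_self)
    simp only [pvMergeFor, List.foldl_cons, hd, Bool.false_eq_true, if_false]
    exact ih (fun dl' h' => h dl' (List.mem_cons_of_mem _ h'))

theorem pvMergeFor_append (key v : String) (K : List (List (String × String)))
    (dl : List (String × String)) :
    pvMergeFor key v (K ++ [dl]) =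
      if pvKeyVal key dl == v then
        (pvMergeFor key v K).update (PySem.Dict.ofList dl).items
      else pvMergeFor key v K := by
  simp [pvMergeFor, List.foldl_append]

-- the invariant: A's merged dict over a keyed list equals B's (order, per-value merge) view
theorem pvInv (key : String) (K : List (List (String × String)))
    (hK : ∀ dl ∈ K, (PySem.Dict.ofList dl).contains key = true) :
    (K.foldl (fun (m : PySem.Dict String (PySem.Dict String String)) dl =>
        let d := PySem.Dict.ofList dl
        if d.contains key then
          let v := d.getD key ""
          if m.contains v then
            m.insert v ((m.getD v PySem.Dict.empty).update d.items)
          else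
            m.insert v d
        else m) PySem.Dict.empty)
      = PySem.Dict.mk ((pvOrder key [] K).map (fun v => (v, pvMergeFor key v K))) := by
  induction K using List.reverseRecOn with
  | nil => rfl
  | append_singleton K dl ih =>
    have hK' : ∀ d ∈ K, (PySem.Dict.ofList d).contains key = true :=
      fun d hd => hK d (List.mem_append_left _ hd)
    have hdl : (PySem.Dict.ofList dl).contains key = true :=
      hK dl (List.mem_append_right _ (List.mem_cons_self))
    set v := pvKeyVal key dl with hv
    set ord := pvOrder key [] K with hord
    have hnd : ord.Nodup := pvOrder_nodup key K [] List.nodup_nil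
    have horder : pvOrder key [] (K ++ [dl]) =
        if ord.contains v then ord else ord ++ [v] := by
      rw [pvOrder, List.foldl_append]; rfl
    rw [List.foldl_append, ih hK']
    simp only [List.foldl_cons, List.foldl_nil, hdl, if_true]
    have hkeys : (PySem.Dict.mk (ord.map fun w => (w, pvMergeFor key w K))).keys = ord := by
      simp [PySem.Dict.keys, Function.comp_def]
    have hcont : (PySem.Dict.mk (ord.map fun w => (w, pvMergeFor key w K))).contains v
        = ord.contains v := by
      simp [PySem.Dict.contains_eq_decide_mem_keys, hkeys]
    by_cases hmem : v ∈ ord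
    · -- key value already seen: A updates the existing entry in place
      have hc : ord.contains v = true := by simpa using hmem
      have hgetD : (PySem.Dict.mk (ord.map fun w => (w, pvMergeFor key w K))).getD v
          PySem.Dict.empty = pvMergeFor key v K := by
        apply PySem.Dict.getD_of_mem_items
        · exact List.mem_map_of_mem hmem
        · simpa [hkeys] using hnd
      rw [show (PySem.Dict.ofList dl).getD key "" = v from rfl, hcont, hc, if_pos rfl, hgetD]
      apply PySem.Dict.ext
      rw [PySem.Dict.items_insert_of_contains _ _ (by rw [hcont]; exact hc)]
      show (ord.map fun w => (w, pvMergeFor key w K)).map _ = _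
      rw [horder, hc, if_pos rfl, List.map_map]
      apply List.map_congr_left
      intro w hw
      by_cases hwv : w = v
      · subst hwv
        simp [pvMergeFor_append, hv]
      · have hne : (pvKeyVal key dl == w) = false := by
          rw [← hv]; simp only [beq_eq_false_iff_ne]
          exact fun h => hwv h.symm
        have hwvb : (w == v) = false := by simpa using hwv
        simp [Function.comp, hwvb, pvMergeFor_append, hne]
    · -- fresh key value: A appends a copied dict
      have hc : ord.contains v = false := by simpa using hmem
      have hnone : ∀ d ∈ K, pvKeyVal key d ≠ v := by
        intro d hd h
        exact hmem (h ▸ pvOrder_of_mem key K [] d hd)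
      rw [show (PySem.Dict.ofList dl).getD key "" = v from rfl, hcont, hc]
      simp only [Bool.false_eq_true, if_false]
      apply PySem.Dict.ext
      rw [PySem.Dict.items_insert_of_not_contains _ _ (by rw [hcont]; exact hc)]
      rw [horder, hc]
      simp only [Bool.false_eq_true, if_false, List.map_append, List.map_cons, List.map_nil]
      congr 1
      · apply List.map_congr_left
        intro w hw
        have hne : (pvKeyVal key dl == w) = false := by
          have : v ≠ w := fun h => hmem (h ▸ hw)
          simpa [hv] using this
        simp [pvMergeFor_append, hne]
      · have : pvMergeFor key v (K ++ [dl]) = PySem.Dict.ofList dl := by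
          rw [pvMergeFor_append]
          simp only [hv, BEq.rfl, if_true]
          rw [pvMergeFor_empty key v K hnone]
          show PySem.Dict.empty.update (PySem.Dict.ofList dl).items = _
          rw [show PySem.Dict.empty.update (PySem.Dict.ofList dl).items
              = PySem.Dict.ofList (PySem.Dict.ofList dl).items from rfl, pvOfList_items]
        rw [this]

-- ===== VERDICT (by name: the statement is the Claim_ definition above) =====
theorem merge_dicts_in_list_spec : Claim_equal_merge_dicts_in_list := by
  intro lst key _
  show merge_dicts_in_list lst key = merge_dicts_in_list_alt lst key
  unfold merge_dicts_in_list merge_dicts_in_list_alt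
  simp only
  set keyed := lst.filter (fun dl => (PySem.Dict.ofList dl).contains key) with hkeyed
  have hfold : lst.foldl (fun (m : PySem.Dict String (PySem.Dict String String)) dl =>
        let d := PySem.Dict.ofList dl
        if d.contains key then
          let v := d.getD key ""
          if m.contains v then
            m.insert v ((m.getD v PySem.Dict.empty).update d.items)
          else
            m.insert v d
        else m) PySem.Dict.empty
      = keyed.foldl (fun m dl =>
        let d := PySem.Dict.ofList dl
        if d.contains key then
          let v := d.getD key ""
          if m.contains v then
            m.insert v ((m.getD v PySem.Dict.empty).update d.items)
          else
            m.insert v d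
        else m) PySem.Dict.empty := by
    rw [hkeyed, List.foldl_filter]
    apply List.foldl_ext
    intro m dl _
    by_cases h : (PySem.Dict.ofList dl).contains key = true <;> simp [h]
  rw [hfold, pvInv key keyed (fun dl hdl => by
    have := List.mem_filter.mp (hkeyed ▸ hdl)
    simpa using this.2)]
  simp [PySem.Dict.values, List.map_map, Function.comp, pvOrder, pvMergeFor]
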